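-- pv_equiv track=rewrite | github.com/Vergil0327/leetcode-history | Two Pointers/1989. Maximum Number of People That Can Be Caught in Tag/solution.py | catchMaximumAmountofPeople
-- ===== SOURCE A (Python) =====
-- from typing import List
--
-- def catchMaximumAmountofPeople(team: List[int], dist: int) -> int:
--     n = len(team)
--
--     j = res = 0
--     for i in range(n):
--         if team[i] == 1:
--             j = max(j, i-dist)
--             while j <= min(i+dist, n-1):
--                 if team[j] == 0:
--                     res += 1
--                     j += 1
--                     break
--                 j += 1
--     return res
-- ===== SOURCE B (Python) =====
-- def catchMaximumAmountofPeople(team, dist):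
--     # Single forward pass with one expiring FIFO of unmatched entries: each pair is
--     # matched when its LATER element arrives, against the oldest still-catchable waiter.
--     res = 0
--     q = []        # indices of waiting unmatched entries, oldest first, all of kind `side`
--     head = 0      # q[head:] is the live queue
--     side = -1     # kind (team value) of the queued entries
--     for i, v in enumerate(team):
--         if v != 0 and v != 1:
--             continue
--         while head < len(q) and q[head] < i - dist:
--             head += 1          # too far left to ever be matched: discard permanently
--         if head < len(q) and side != v:
--             head += 1          # oldest live waiter is of the opposite kind: match it
--             res += 1
--         elif head < len(q):
--             q.append(i)        # same kind: join the queue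
--         else:
--             q = [i]
--             head = 0
--             side = v
--     return res
-- ===== Notes on version B (the rewrite author's own statement) =====
-- stated objective: alternative
-- what changed: B replaces A's tagger-driven scan with a persistent look-ahead pointer j by a single forward pass that keeps one expiring FIFO of unmatched waiting entries and decides each match at the later element of the pair (a person arriving matches the oldest still-catchable waiting tagger and vice versa).
import Mathlib
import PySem

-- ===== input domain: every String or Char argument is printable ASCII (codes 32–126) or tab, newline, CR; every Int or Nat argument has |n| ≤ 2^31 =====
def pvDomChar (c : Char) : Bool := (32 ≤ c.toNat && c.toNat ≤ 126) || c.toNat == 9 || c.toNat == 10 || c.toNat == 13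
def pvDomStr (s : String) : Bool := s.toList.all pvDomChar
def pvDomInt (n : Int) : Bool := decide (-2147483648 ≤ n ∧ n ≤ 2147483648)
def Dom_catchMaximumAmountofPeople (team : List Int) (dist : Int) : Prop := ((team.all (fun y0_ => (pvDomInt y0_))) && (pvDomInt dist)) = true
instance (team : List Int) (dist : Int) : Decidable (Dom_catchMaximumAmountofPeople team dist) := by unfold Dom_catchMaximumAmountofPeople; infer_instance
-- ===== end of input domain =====

-- B replaces A's tagger-driven scan with a persistent look-ahead pointer by a single
-- forward pass keeping one expiring FIFO of unmatched waiters, matching each pair at its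
-- later element; objective: alternative (same cost, different algorithmic organisation).

-- ===== PORT A =====
-- A's inner `while j <= min(i+dist, n-1)` loop; the fuel (m - j + 1).toNat is exactly the
-- number of iterations the Python while can make (j increases by 1 each turn).
def pvInnerA (team : List Int) (m : Int) : Nat → Int → Int → Int × Int
  | 0, j, res => (j, res)
  | f + 1, j, res =>
    if j ≤ m then
      if PySem.List.pyGetD team j 0 == 0 then (j + 1, res + 1)
      else pvInnerA team m f (j + 1) res
    else (j, res)

def catchMaximumAmountofPeople (team : List Int) (dist : Int) : Int :=
  let n : Int := PySem.List.len team
  ((PySem.List.pyRange 0 n 1).foldl (fun (st : Int × Int) i =>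
    if PySem.List.pyGetD team i 0 == 1 then
      let j := max st.1 (i - dist)
      let m := min (i + dist) (n - 1)
      pvInnerA team m (m - j + 1).toNat j st.2
    else st) (0, 0)).2

-- ===== PORT B =====
-- Source B's `while head < len(q) and q[head] < i - dist: head += 1` expiry loop
def pvAdvance (q : List Int) (bound : Int) (p : Nat) : Nat :=
  if h : p < q.length then
    if q[p] < bound then pvAdvance q bound (p + 1) else p
  else p
termination_by q.length - p

-- the body of Source B's `for i, v in enumerate(team)` loop; state = (q, head, side, res)
def pvStepB (dist : Int) (st : List Int × Nat × Int × Int) (iv : Int × Int) : List Int × Nat × Int × Int :=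
  if iv.2 ≠ 0 ∧ iv.2 ≠ 1 then st   -- `continue`
  else
    let head := pvAdvance st.1 (iv.1 - dist) st.2.1
    if head < st.1.length then
      if st.2.2.1 ≠ iv.2 then (st.1, head + 1, st.2.2.1, st.2.2.2 + 1)   -- match oldest live waiter
      else (st.1 ++ [iv.1], head, st.2.2.1, st.2.2.2)                    -- same kind: join queue
    else ([iv.1], 0, iv.2, st.2.2.2)                                     -- queue empty: restart it

def catchMaximumAmountofPeople_alt (team : List Int) (dist : Int) : Int :=
  ((PySem.List.enumerate team 0).foldl (pvStepB dist) ([], 0, -1, 0)).2.2.2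

-- ===== PRECONDITION & SPEC =====
def Spec_catchMaximumAmountofPeople (team : List Int) (dist : Int) (out : Int) : Prop := out = catchMaximumAmountofPeople_alt team dist
instance (team : List Int) (dist : Int) (out : Int) : Decidable (Spec_catchMaximumAmountofPeople team dist out) := by unfold Spec_catchMaximumAmountofPeople; infer_instance

-- ===== CLAIM (what is proved, stated in full; the proofs are below) =====
def Claim_equal_catchMaximumAmountofPeople : Prop := ∀ (team : List Int) (dist : Int), Dom_catchMaximumAmountofPeople team dist → Spec_catchMaximumAmountofPeople team dist (catchMaximumAmountofPeople team dist)

-- ===== LEMMAS AND PROOFS =====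

-- Proof plan: A is shown equal to a tagger-driven merge over the two index lists
-- (pvMergeRun, by a simulation with a people-counter invariant); both pvMergeRun and B's
-- queue fold are then shown equal to a symmetric recursive matcher pvSym over the index
-- lists, which settles A = B.

-- the index lists of people (zeros) and taggers (ones)
def pvPs (pairs : List (Int × Int)) : List Int :=
  pairs.filterMap (fun iv => if iv.2 == 0 then some iv.1 else none)

def pvTs (pairs : List (Int × Int)) : List Int :=
  pairs.filterMap (fun iv => if iv.2 == 1 then some iv.1 else none)

def pvPeople (team : List Int) : List Int := pvPs (PySem.List.enumerate team 0)

def pvTaggers (team : List Int) : List Int := pvTs (PySem.List.enumerate team 0)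

-- the tagger-driven merge: for each tagger, discard dead people, then catch the next one
def pvMergeRun (team : List Int) (dist : Int) : Int :=
  let people := pvPeople team
  ((pvTaggers team).foldl (fun (st : Nat × Int) t =>
    let p := pvAdvance people (t - dist) st.1
    if h : p < people.length then
      if people[p] ≤ t + dist then (p + 1, st.2 + 1) else (p, st.2)
    else (p, st.2)) (0, 0)).2

-- `pvPeople` is the strictly increasing list of the Int indices of the zeros of `team`.
theorem pvPeople_pairwise (team : List Int) : (pvPeople team).Pairwise (· < ·) := by
  unfold pvPeople pvPs
  rw [List.pairwise_filterMap]
  exact (PySem.List.pairwise_lt_enumerate team 0).imp_of_mem (by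
    intro a b _ _ hab x hx y hy
    simp only [ite_eq_iff] at hx hy
    rcases hx with ⟨_, hx⟩ | ⟨_, h⟩; rcases hy with ⟨_, hy⟩ | ⟨_, h⟩
    · cases hx; cases hy; exact hab
    · cases h
    · cases h)

theorem pvPeople_mem_iff (team : List Int) (q : Int) :
    q ∈ pvPeople team ↔ ∃ (k : Nat) (h : k < team.length), q = (k : Int) ∧ team[k] = 0 := by
  unfold pvPeople pvPs
  simp only [List.mem_filterMap, PySem.List.mem_enumerate_iff]
  constructor
  · rintro ⟨⟨i, v⟩, ⟨k, hk, hp⟩, hq⟩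
    cases hp
    simp only [beq_iff_eq] at hq
    split at hq
    · cases hq; exact ⟨k, hk, by simpa using rfl, by assumption⟩
    · cases hq
  · rintro ⟨k, hk, rfl, h0⟩
    exact ⟨((k : Int), team[k]), ⟨k, hk, by simp⟩, by simp [h0]⟩

-- count of people strictly left of a bound
def pvCnt (team : List Int) (b : Int) : Nat := (pvPeople team).countP (fun q => decide (q < b))

theorem pvCnt_mono (team : List Int) {b b' : Int} (h : b ≤ b') : pvCnt team b ≤ pvCnt team b' := by
  exact List.countP_mono_left (by intro a _ ha; simp at ha ⊢; omega)

theorem pvCnt_le_length (team : List Int) (b : Int) : pvCnt team b ≤ (pvPeople team).length :=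
  List.countP_le_length

-- the fundamental prefix fact on a strictly increasing list
theorem pv_lt_iff (l : List Int) (hl : l.Pairwise (· < ·)) (b : Int) (k : Nat) (hk : k < l.length) :
    l[k] < b ↔ k < l.countP (fun q => decide (q < b)) := by
  induction l generalizing k with
  | nil => simp at hk
  | cons x xs ih =>
    rcases List.pairwise_cons.mp hl with ⟨hx, hxs⟩
    rw [List.countP_cons]
    cases k with
    | zero =>
      simp only [List.getElem_cons_zero]
      by_cases hxb : x < b
      · simp [hxb]
      · have : xs.countP (fun q => decide (q < b)) = 0 := by
          rw [List.countP_eq_zero]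
          intro a ha
          simp only [decide_eq_true_eq]
          have := hx a ha; omega
        simp [hxb, this]
    | succ k =>
      simp only [List.getElem_cons_succ]
      have hk' : k < xs.length := by simpa using hk
      rw [ih hxs k hk']
      by_cases hxb : x < b
      · simp [hxb]
      · have : xs.countP (fun q => decide (q < b)) = 0 := by
          rw [List.countP_eq_zero]
          intro a ha
          simp only [decide_eq_true_eq]
          have := hx a ha; omega
        have hb : ¬ xs[k] < b := by have := hx _ (xs.getElem_mem hk'); omega
        simp [hxb, this, hb]

theorem pvCnt_lt_iff (team : List Int) (b : Int) (k : Nat) (hk : k < (pvPeople team).length) :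
    (pvPeople team)[k] < b ↔ k < pvCnt team b :=
  pv_lt_iff _ (pvPeople_pairwise team) b k hk

-- if no person with index in [b, b') exists at position pvCnt b, the count does not move
theorem pvCnt_stable (team : List Int) {b b' : Int} (hbb : b ≤ b')
    (h : ∀ (hc : pvCnt team b < (pvPeople team).length), ¬ (pvPeople team)[pvCnt team b] < b') :
    pvCnt team b' = pvCnt team b := by
  refine le_antisymm ?_ (pvCnt_mono team hbb)
  by_contra hlt
  push Not at hlt
  have hc : pvCnt team b < (pvPeople team).length :=
    lt_of_lt_of_le hlt (pvCnt_le_length team b')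
  exact h hc ((pvCnt_lt_iff team b' _ hc).mpr hlt)

-- after catching person l[c], the count up to l[c]+1 is c+1
theorem pvCnt_catch (team : List Int) (c : Nat) (hc : c < (pvPeople team).length)
    (hceq : c = pvCnt team ((pvPeople team)[c])) :
    pvCnt team ((pvPeople team)[c] + 1) = c + 1 := by
  have h1 : c < pvCnt team ((pvPeople team)[c] + 1) := by
    rw [← pvCnt_lt_iff team _ c hc]; omega
  have h2 : pvCnt team ((pvPeople team)[c] + 1) ≤ c + 1 := by
    by_contra hgt
    push Not at hgt
    have hc1 : c + 1 < (pvPeople team).length :=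
      lt_of_lt_of_le hgt (pvCnt_le_length team _)
    have := (pvCnt_lt_iff team ((pvPeople team)[c] + 1) (c+1) hc1).mpr hgt
    have hlt : (pvPeople team)[c] < (pvPeople team)[c+1] := by
      have := List.pairwise_iff_getElem.mp (pvPeople_pairwise team) c (c+1) hc hc1 (by omega)
      exact this
    omega
  omega

-- pvCnt b ≤ len, and the element at pvCnt b (if any) is ≥ b
theorem pvCnt_getElem_ge (team : List Int) (b : Int) (hc : pvCnt team b < (pvPeople team).length) :
    b ≤ (pvPeople team)[pvCnt team b] := by
  by_contra h
  push Not at h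
  have := (pvCnt_lt_iff team b _ hc).mp h
  omega

-- if team[j] = 0 with 0 ≤ j < n then the person at position pvCnt j is exactly j
theorem pvPeople_getElem_cnt (team : List Int) (j : Int) (hj : 0 ≤ j)
    (hjn : j < (team.length : Int)) (h0 : PySem.List.pyGetD team j 0 = 0) :
    ∃ (hc : pvCnt team j < (pvPeople team).length), (pvPeople team)[pvCnt team j] = j := by
  have hmem : j ∈ pvPeople team := by
    rw [pvPeople_mem_iff]
    have hkn : j.toNat < team.length := by omega
    refine ⟨j.toNat, hkn, (Int.toNat_of_nonneg hj).symm, ?_⟩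
    rw [PySem.List.pyGetD_eq_getElem team 0 hj hjn] at h0
    exact h0
  rcases List.mem_iff_getElem.mp hmem with ⟨k, hk, hkj⟩
  have hck : pvCnt team j ≤ k := by
    by_contra h
    push Not at h
    have := (pvCnt_lt_iff team j k hk).mpr h
    omega
  have hc : pvCnt team j < (pvPeople team).length := lt_of_le_of_lt hck hk
  refine ⟨hc, le_antisymm ?_ (pvCnt_getElem_ge team j hc)⟩
  calc (pvPeople team)[pvCnt team j]
      ≤ (pvPeople team)[k] := by
        rcases eq_or_lt_of_le hck with h | h
        · simp [h]
        · exact le_of_lt (List.pairwise_iff_getElem.mp (pvPeople_pairwise team) _ k hc hk h)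
    _ = j := hkj

-- people indices lie in [0, n)
theorem pvPeople_lt_length (team : List Int) (q : Int) (hq : q ∈ pvPeople team) :
    0 ≤ q ∧ q < (team.length : Int) := by
  rw [pvPeople_mem_iff] at hq
  rcases hq with ⟨k, hk, rfl, _⟩
  omega

-- characterization of the advance/expiry loop: it moves the pointer to the count of entries < bound
theorem pvAdvance_eq (l : List Int) (hl : l.Pairwise (· < ·)) (b : Int) (p : Nat) :
    pvAdvance l b p = max p (l.countP (fun q => decide (q < b))) := by
  induction p using pvAdvance.induct l b with
  | case1 p h hpb ih =>
    rw [pvAdvance, dif_pos h, if_pos hpb, ih]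
    have := (pv_lt_iff l hl b p h).mp hpb
    omega
  | case2 p h hpb =>
    rw [pvAdvance, dif_pos h, if_neg hpb]
    have := pv_lt_iff l hl b p h
    omega
  | case3 p h =>
    rw [pvAdvance, dif_neg h]
    have : l.countP (fun q => decide (q < b)) ≤ l.length := List.countP_le_length
    omega

-- characterization of A's inner while loop in terms of the people list
theorem pvInnerA_eq (team : List Int) (m : Int) (f : Nat) (j res : Int)
    (hj : 0 ≤ j) (hm : m ≤ (team.length : Int) - 1) (hf : m - j + 1 ≤ (f : Int)) :
    pvInnerA team m f j res =
      (if (pvPeople team).getD (pvCnt team j) (m + 1) ≤ m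
       then ((pvPeople team).getD (pvCnt team j) (m + 1) + 1, res + 1)
       else (max j (m + 1), res)) := by
  induction f generalizing j with
  | zero =>
    have hjm : ¬ j ≤ m := by push_cast at hf; omega
    rw [pvInnerA]
    have hcond : ¬ (pvPeople team).getD (pvCnt team j) (m + 1) ≤ m := by
      by_cases hc : pvCnt team j < (pvPeople team).length
      · rw [List.getD_eq_getElem _ _ hc]
        have := pvCnt_getElem_ge team j hc
        omega
      · rw [List.getD_eq_default _ _ (by omega)]
        omega
    rw [if_neg hcond]
    have : max j (m + 1) = j := by omega
    rw [this]
  | succ f ih =>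
    rw [pvInnerA]
    by_cases hjm : j ≤ m
    · rw [if_pos hjm]
      by_cases h0 : PySem.List.pyGetD team j 0 == 0
      · rw [if_pos h0]
        rcases pvPeople_getElem_cnt team j hj (by omega) (by simpa using h0) with ⟨hc, hcj⟩
        rw [List.getD_eq_getElem _ _ hc, hcj, if_pos hjm]
      · rw [if_neg h0]
        have hstep : pvCnt team (j + 1) = pvCnt team j := by
          apply pvCnt_stable team (by omega)
          intro hc hlt
          have hge := pvCnt_getElem_ge team j hc
          have heq : (pvPeople team)[pvCnt team j] = j := by omega
          have hmem := (pvPeople team).getElem_mem hc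
          rw [heq] at hmem
          rw [pvPeople_mem_iff] at hmem
          rcases hmem with ⟨k, hk, hkj, hk0⟩
          apply h0
          subst hkj
          simp [PySem.List.pyGetD_natCast, hk, hk0]
        rw [ih (j + 1) (by omega) (by push_cast at hf ⊢; omega), hstep]
        have : max (j + 1) (m + 1) = m + 1 := by omega
        rw [this]
        have : max j (m + 1) = m + 1 := by omega
        rw [this]
    · rw [if_neg hjm]
      have hcond : ¬ (pvPeople team).getD (pvCnt team j) (m + 1) ≤ m := by
        by_cases hc : pvCnt team j < (pvPeople team).length
        · rw [List.getD_eq_getElem _ _ hc]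
          have := pvCnt_getElem_ge team j hc
          omega
        · rw [List.getD_eq_default _ _ (by omega)]
          omega
      rw [if_neg hcond]
      have : max j (m + 1) = j := by omega
      rw [this]

-- generic lockstep simulation of two folds over the same list
theorem pv_foldl_rel {α σ τ : Type} (R : σ → τ → Prop) (f : σ → α → σ) (g : τ → α → τ)
    (l : List α) (hstep : ∀ a ∈ l, ∀ s t, R s t → R (f s a) (g t a)) :
    ∀ (s : σ) (t : τ), R s t → R (l.foldl f s) (l.foldl g t) := by
  induction l with
  | nil => intro s t h; exact h
  | cons x xs ih =>
    intro s t h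
    exact ih (fun a ha => hstep a (List.mem_cons_of_mem x ha))
      (f s x) (g t x) (hstep x (List.mem_cons_self) s t h)

-- the invariant between A's (j, res) and the merge's (p, res)
def pvRel (team : List Int) (a : Int × Int) (b : Nat × Int) : Prop :=
  a.2 = b.2 ∧ 0 ≤ a.1 ∧ b.1 = pvCnt team a.1

-- the per-tagger step preserves the invariant
theorem pv_step (team : List Int) (dist i : Int)
    (a : Int × Int) (b : Nat × Int) (hR : pvRel team a b) :
    pvRel team
      (pvInnerA team (min (i + dist) ((team.length : Int) - 1))
        ((min (i + dist) ((team.length : Int) - 1)) - max a.1 (i - dist) + 1).toNat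
        (max a.1 (i - dist)) a.2)
      (let p := pvAdvance (pvPeople team) (i - dist) b.1
       if h : p < (pvPeople team).length then
         if (pvPeople team)[p] ≤ i + dist then (p + 1, b.2 + 1) else (p, b.2)
       else (p, b.2)) := by
  rcases hR with ⟨hres, hj0, hp⟩
  set j1 := max a.1 (i - dist) with hj1
  set m := min (i + dist) ((team.length : Int) - 1) with hm
  have hj1nn : 0 ≤ j1 := by omega
  have hadv : pvAdvance (pvPeople team) (i - dist) b.1 = pvCnt team j1 := by
    rw [pvAdvance_eq _ (pvPeople_pairwise team), hp]
    show max (pvCnt team a.1) (pvCnt team (i - dist)) = pvCnt team j1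
    rcases le_total a.1 (i - dist) with h | h
    · have he : j1 = i - dist := by omega
      rw [he]
      have := pvCnt_mono team h
      omega
    · have he : j1 = a.1 := by omega
      rw [he]
      have := pvCnt_mono team h
      omega
  have hinner := pvInnerA_eq team m ((m - j1 + 1).toNat) j1 a.2 hj1nn
    (by omega) (Int.self_le_toNat _)
  by_cases hcl : pvCnt team j1 < (pvPeople team).length
  · have hge := pvCnt_getElem_ge team j1 hcl
    have hrange := pvPeople_lt_length team _ ((pvPeople team).getElem_mem hcl)
    by_cases hcatch : (pvPeople team)[pvCnt team j1] ≤ i + dist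
    · -- catch: the person at the pointer is inside the window
      have hcm : (pvPeople team)[pvCnt team j1] ≤ m := by omega
      rw [hinner, List.getD_eq_getElem _ _ hcl, if_pos hcm]
      simp only [hadv, dif_pos hcl, if_pos hcatch]
      refine ⟨by simp [hres], by omega, ?_⟩
      have hcc : pvCnt team ((pvPeople team)[pvCnt team j1]) = pvCnt team j1 :=
        pvCnt_stable team hge (fun _ hlt => absurd hlt (lt_irrefl _))
      exact (pvCnt_catch team (pvCnt team j1) hcl hcc.symm).symm
    · -- no catch: the person at the pointer is beyond the window
      have hcm : ¬ (pvPeople team)[pvCnt team j1] ≤ m := by omega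
      rw [hinner, List.getD_eq_getElem _ _ hcl, if_neg hcm]
      simp only [hadv, dif_pos hcl, if_neg hcatch]
      refine ⟨hres, by omega, ?_⟩
      symm
      apply pvCnt_stable team (le_max_left j1 (m + 1))
      intro _ hlt
      exact hcm (by omega)
  · -- no person left at all
    have hcond : ¬ (pvPeople team).getD (pvCnt team j1) (m + 1) ≤ m := by
      rw [List.getD_eq_default _ _ (by omega)]
      omega
    rw [hinner, if_neg hcond]
    simp only [hadv, dif_neg hcl]
    refine ⟨hres, by omega, ?_⟩
    symm
    exact pvCnt_stable team (le_max_left j1 (m + 1)) (fun hc' _ => absurd hc' hcl)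

-- the merge's fold over the taggers list rewritten as a fold over range(n)
theorem pvMerge_as_range (team : List Int) (dist : Int) :
    pvMergeRun team dist =
      ((PySem.List.pyRange 0 (team.length : Int) 1).foldl (fun (st : Nat × Int) i =>
        if PySem.List.pyGetD team i 0 == 1 then
          (let p := pvAdvance (pvPeople team) (i - dist) st.1
           if h : p < (pvPeople team).length then
             if (pvPeople team)[p] ≤ i + dist then (p + 1, st.2 + 1) else (p, st.2)
           else (p, st.2))
        else st) (0, 0)).2 := by
  simp only [pvMergeRun, pvTaggers, pvTs]
  rw [PySem.List.enumerate_eq_map_pyRange team 0, List.filterMap_map, List.foldl_filterMap]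
  simp only [PySem.List.len_eq]
  congr 1
  apply List.foldl_ext
  intro st i _
  simp only [Function.comp]
  by_cases h1 : PySem.List.pyGetD team i 0 == 1
  · simp [h1]
  · simp [h1]

-- A equals the tagger-driven merge
theorem pvA_eq_merge (team : List Int) (dist : Int) :
    catchMaximumAmountofPeople team dist = pvMergeRun team dist := by
  unfold catchMaximumAmountofPeople
  rw [pvMerge_as_range]
  simp only [PySem.List.len_eq]
  have hcnt0 : pvCnt team 0 = 0 := by
    rw [pvCnt, List.countP_eq_zero]
    intro q hq
    have := pvPeople_lt_length team q hq
    simp only [decide_eq_true_eq]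
    omega
  have := pv_foldl_rel (pvRel team)
    (fun (st : Int × Int) i =>
      if PySem.List.pyGetD team i 0 == 1 then
        pvInnerA team (min (i + dist) ((team.length : Int) - 1))
          ((min (i + dist) ((team.length : Int) - 1)) - max st.1 (i - dist) + 1).toNat
          (max st.1 (i - dist)) st.2
      else st)
    (fun (st : Nat × Int) i =>
      if PySem.List.pyGetD team i 0 == 1 then
        (let p := pvAdvance (pvPeople team) (i - dist) st.1
         if h : p < (pvPeople team).length then
           if (pvPeople team)[p] ≤ i + dist then (p + 1, st.2 + 1) else (p, st.2)
         else (p, st.2))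
      else st)
    (PySem.List.pyRange 0 (team.length : Int) 1)
    (by
      intro i hi s t hR
      by_cases h1 : PySem.List.pyGetD team i 0 == 1
      · simpa only [if_pos h1] using pv_step team dist i s t hR
      · simpa only [if_neg h1] using hR)
    (0, 0) (0, 0) ⟨rfl, le_refl 0, hcnt0.symm⟩
  exact this.1

-- ===== the symmetric matcher and its calculus =====

-- symmetric greedy matcher over the two (sorted) index lists: compare the heads, discard
-- whichever is too far left to ever be matched, otherwise match the two heads
def pvSym (dist : Int) : List Int → List Int → Int
  | [], _ => 0
  | _ :: _, [] => 0
  | p :: ps, t :: ts =>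
    if p < t - dist then pvSym dist ps (t :: ts)
    else if t < p - dist then pvSym dist (p :: ps) ts
    else 1 + pvSym dist ps ts
termination_by ps ts => ps.length + ts.length

theorem pvSym_nil_right (dist : Int) (ps : List Int) : pvSym dist ps [] = 0 := by
  cases ps <;> simp [pvSym]

theorem pvSym_neg (dist : Int) (h : dist < 0) (ps ts : List Int) : pvSym dist ps ts = 0 := by
  induction ps, ts using pvSym.induct dist with
  | case1 ts => simp [pvSym]
  | case2 p ps => simp [pvSym]
  | case3 p ps t ts hlt ih => rw [pvSym, if_pos hlt]; exact ih
  | case4 p ps t ts hlt hlt2 ih => rw [pvSym, if_neg hlt, if_pos hlt2]; exact ih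
  | case5 p ps t ts hlt hlt2 ih => omega

-- dropping a dead person from the front
theorem pvSym_dropP (dist : Int) (ps ts : List Int) (f : Int)
    (hf : ∀ t ∈ ts.head?, f < t - dist) : pvSym dist (f :: ps) ts = pvSym dist ps ts := by
  cases ts with
  | nil => rw [pvSym_nil_right, pvSym_nil_right]
  | cons t ts' =>
    have h := hf t (by simp)
    rw [pvSym, if_pos h]

-- dropping a dead tagger from the front
theorem pvSym_dropT (dist : Int) (ps ts : List Int) (f : Int)
    (hf : ∀ z ∈ ps.head?, f < z - dist) : pvSym dist ps (f :: ts) = pvSym dist ps ts := by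
  cases ps with
  | nil => simp [pvSym]
  | cons z ps' =>
    have hz : f < z - dist := hf z (by simp)
    by_cases hd : dist < 0
    · rw [pvSym_neg dist hd, pvSym_neg dist hd]
    · have h1 : ¬ z < f - dist := by omega
      rw [pvSym, if_neg h1, if_pos hz]

theorem pvSym_dropP_prefix (dist : Int) (D ps ts : List Int)
    (h : ∀ f ∈ D, ∀ t ∈ ts.head?, f < t - dist) :
    pvSym dist (D ++ ps) ts = pvSym dist ps ts := by
  induction D with
  | nil => rfl
  | cons f D' ih =>
    rw [List.cons_append, pvSym_dropP dist (D' ++ ps) ts f (h f (by simp))]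
    exact ih (fun g hg => h g (by simp [hg]))

theorem pvSym_dropT_prefix (dist : Int) (D ps ts : List Int)
    (h : ∀ f ∈ D, ∀ z ∈ ps.head?, f < z - dist) :
    pvSym dist ps (D ++ ts) = pvSym dist ps ts := by
  induction D with
  | nil => rfl
  | cons f D' ih =>
    rw [List.cons_append, pvSym_dropT dist ps (D' ++ ts) f (h f (by simp))]
    exact ih (fun g hg => h g (by simp [hg]))

-- elementary description of the advance/expiry loop
theorem pvAdvance_spec (q : List Int) (b : Int) (p : Nat) (hp : p ≤ q.length) :
    p ≤ pvAdvance q b p ∧ pvAdvance q b p ≤ q.length ∧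
    (∀ k (hk : k < q.length), p ≤ k → k < pvAdvance q b p → q[k] < b) ∧
    (∀ (h : pvAdvance q b p < q.length), ¬ q[pvAdvance q b p] < b) := by
  induction p using pvAdvance.induct q b with
  | case1 p h hpb ih =>
    rw [pvAdvance, dif_pos h, if_pos hpb]
    obtain ⟨i1, i2, i3, i4⟩ := ih (by omega)
    refine ⟨by omega, i2, ?_, i4⟩
    intro k hk hpk hka
    rcases Nat.eq_or_lt_of_le hpk with heq | hlt
    · subst heq; exact hpb
    · exact i3 k hk (by omega) hka
  | case2 p h hpb =>
    rw [pvAdvance, dif_pos h, if_neg hpb]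
    exact ⟨le_refl p, by omega, by omega, fun _ => hpb⟩
  | case3 p h =>
    rw [pvAdvance, dif_neg h]
    exact ⟨le_refl p, by omega, by omega, fun hlt => absurd hlt h⟩

-- the expiry loop splits the queue suffix into a dead prefix and the live remainder
theorem pvDrop_split (q : List Int) (b : Int) (p : Nat) (hp : p ≤ q.length) :
    ∃ D, q.drop p = D ++ q.drop (pvAdvance q b p) ∧ (∀ f ∈ D, f < b) := by
  obtain ⟨h1, h2, h3, _⟩ := pvAdvance_spec q b p hp
  refine ⟨(q.drop p).take (pvAdvance q b p - p), ?_, ?_⟩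
  · conv_lhs => rw [← List.take_append_drop (pvAdvance q b p - p) (q.drop p)]
    rw [List.drop_drop]
    congr 2
    omega
  · intro f hf
    obtain ⟨k, hk, rfl⟩ := List.mem_iff_getElem.mp hf
    simp only [List.length_take, List.length_drop, lt_min_iff] at hk
    rw [List.getElem_take, List.getElem_drop]
    exact h3 (p + k) (by omega) (by omega) (by omega)

theorem pvPs_mem (l : List (Int × Int)) (x : Int) (hx : x ∈ pvPs l) : ∃ iv ∈ l, iv.1 = x := by
  unfold pvPs at hx
  rcases List.mem_filterMap.mp hx with ⟨iv, hmem, hv⟩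
  refine ⟨iv, hmem, ?_⟩
  by_cases h : iv.2 == 0
  · simp [h] at hv; omega
  · simp [h] at hv

theorem pvTs_mem (l : List (Int × Int)) (x : Int) (hx : x ∈ pvTs l) : ∃ iv ∈ l, iv.1 = x := by
  unfold pvTs at hx
  rcases List.mem_filterMap.mp hx with ⟨iv, hmem, hv⟩
  refine ⟨iv, hmem, ?_⟩
  by_cases h : iv.2 == 1
  · simp [h] at hv; omega
  · simp [h] at hv

theorem pvSym_nil_left (dist : Int) (ts : List Int) : pvSym dist [] ts = 0 := by simp [pvSym]

-- ===== B's queue fold computes pvSym =====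

-- continuation invariant for B's loop: with W = q.drop head the waiting entries (all < b,
-- of kind `side`), the remaining fold adds exactly the symmetric-match count of W joined
-- with the index lists of the remaining pairs
theorem pvRunB (dist : Int) (pairs : List (Int × Int)) :
    ∀ (q : List Int) (head : Nat) (side res : Int) (b : Int),
    head ≤ q.length →
    (∀ e ∈ q.drop head, e < b) →
    (∀ iv ∈ pairs, b ≤ iv.1) →
    (pairs.map Prod.fst).Pairwise (· < ·) →
    (q.drop head ≠ [] → side = 0 ∨ side = 1) →
    (pairs.foldl (pvStepB dist) (q, head, side, res)).2.2.2 =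
      res + (if side = 0 then pvSym dist (q.drop head ++ pvPs pairs) (pvTs pairs)
             else pvSym dist (pvPs pairs) (q.drop head ++ pvTs pairs)) := by
  induction pairs with
  | nil =>
    intro q head side res b _ _ _ _ _
    simp only [List.foldl_nil, pvPs, pvTs, List.filterMap_nil, List.append_nil]
    split
    · rw [pvSym_nil_right]; omega
    · rw [pvSym_nil_left]; omega
  | cons iv rest ih =>
    intro q head side res b hq hW hge hpw hside
    obtain ⟨i, v⟩ := iv
    have hbi : b ≤ i := hge (i, v) (List.mem_cons_self)
    have hpw2 : (i :: rest.map Prod.fst).Pairwise (· < ·) := by simpa using hpw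
    rcases List.pairwise_cons.mp hpw2 with ⟨hrlt, hrest_pw⟩
    have hrest_ge : ∀ iv' ∈ rest, (i + 1 : Int) ≤ iv'.1 := by
      intro iv' hiv'
      have := hrlt iv'.1 (List.mem_map_of_mem hiv')
      omega
    have hPge : ∀ x ∈ pvPs rest, (i + 1 : Int) ≤ x := by
      intro x hx; rcases pvPs_mem rest x hx with ⟨iv', hm, rfl⟩; exact hrest_ge iv' hm
    have hTge : ∀ x ∈ pvTs rest, (i + 1 : Int) ≤ x := by
      intro x hx; rcases pvTs_mem rest x hx with ⟨iv', hm, rfl⟩; exact hrest_ge iv' hm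
    simp only [List.foldl_cons]
    by_cases hv : v ≠ 0 ∧ v ≠ 1
    · -- `continue`: the pair contributes to neither index list
      have hstep : pvStepB dist (q, head, side, res) (i, v) = (q, head, side, res) := by
        rw [pvStepB, if_pos hv]
      rw [hstep, ih q head side res (i + 1) hq (fun e he => lt_of_lt_of_le (hW e he) (by omega))
        hrest_ge hrest_pw hside]
      have hps : pvPs ((i, v) :: rest) = pvPs rest := by
        simp [pvPs, hv.1]
      have hts : pvTs ((i, v) :: rest) = pvTs rest := by
        simp [pvTs, hv.2]
      rw [hps, hts]
    · -- v = 0 or v = 1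
      push Not at hv
      have hv01 : v = 0 ∨ v = 1 := by
        by_cases h0 : v = 0
        · exact Or.inl h0
        · exact Or.inr (hv h0)
      have hstep0 : pvStepB dist (q, head, side, res) (i, v) =
          (if pvAdvance q (i - dist) head < q.length then
             if side ≠ v then (q, pvAdvance q (i - dist) head + 1, side, res + 1)
             else (q ++ [i], pvAdvance q (i - dist) head, side, res)
           else ([i], 0, v, res)) := by
        rw [pvStepB]
        have hnot : ¬ ((i, v).2 ≠ 0 ∧ (i, v).2 ≠ 1) := by
          simp only [not_and, not_not]
          intro h
          exact hv h
        rw [if_neg hnot]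
      obtain ⟨ha1, ha2, _, ha4⟩ := pvAdvance_spec q (i - dist) head hq
      obtain ⟨D, hD, hDlt⟩ := pvDrop_split q (i - dist) head hq
      set head' := pvAdvance q (i - dist) head with hh'
      have hW' : ∀ e ∈ q.drop head', e < b := by
        intro e he
        exact hW e (by rw [hD]; exact List.mem_append_right D he)
      rcases hv01 with rfl | rfl
      · -- v = 0: a person arrives
        have hps : pvPs ((i, (0:Int)) :: rest) = i :: pvPs rest := by
          simp [pvPs, List.filterMap_cons]
        have hts : pvTs ((i, (0:Int)) :: rest) = pvTs rest := by
          simp [pvTs, List.filterMap_cons]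
        rw [hps, hts]
        by_cases hlen : head' < q.length
        · have hcons : q.drop head' = q[head'] :: q.drop (head' + 1) := List.drop_eq_getElem_cons hlen
          have hlive : ¬ q[head'] < i - dist := ha4 hlen
          have hfb : q[head'] < b := hW' _ (by rw [hcons]; exact List.mem_cons_self)
          have hdist1 : 1 ≤ dist := by omega
          have hne : q.drop head ≠ [] := by
            intro hc
            rw [hD, hcons] at hc
            simp at hc
            omega
          rcases hside hne with h0 | h1
          · -- side = 0 = v: same kind, append
            subst h0
            rw [hstep0, if_pos hlen, if_neg (by simp)]
            rw [ih (q ++ [i]) head' 0 res (i + 1)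
              (by rw [List.length_append]; omega)
              (by
                intro e he
                rw [List.drop_append_of_le_length (by omega)] at he
                rcases List.mem_append.mp he with h | h
                · exact lt_of_lt_of_le (hW' e h) (by omega)
                · simp at h; omega)
              hrest_ge hrest_pw (fun _ => Or.inl rfl)]
            rw [if_pos rfl, if_pos rfl]
            rw [List.drop_append_of_le_length (by omega)]
            have hgoal : q.drop head ++ (i :: pvPs rest) = D ++ ((q.drop head' ++ [i]) ++ pvPs rest) := by
              rw [hD, List.append_assoc, List.append_assoc, List.singleton_append]
            rw [hgoal, pvSym_dropP_prefix dist D _ _ (by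
              intro f hf t ht
              have h1 := hDlt f hf
              have h2 := hTge t (List.mem_of_mem_head? ht)
              omega)]
          · -- side = 1 ≠ v: match the oldest live waiting tagger
            subst h1
            rw [hstep0, if_pos hlen, if_pos (by norm_num)]
            rw [ih q (head' + 1) 1 (res + 1) (i + 1)
              (by omega)
              (by
                intro e he
                have : e ∈ q.drop head' := by
                  rw [hcons]
                  exact List.mem_cons_of_mem _ he
                exact lt_of_lt_of_le (hW' e this) (by omega))
              hrest_ge hrest_pw (fun _ => Or.inr rfl)]
            rw [if_neg (by norm_num), if_neg (by norm_num)]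
            have hgoal : q.drop head ++ pvTs rest = D ++ (q.drop head' ++ pvTs rest) := by
              rw [hD, List.append_assoc]
            rw [hgoal, pvSym_dropT_prefix dist D _ _ (by
              intro f hf z hz
              have h1 := hDlt f hf
              have h2 : i = z := by simpa using hz
              omega)]
            rw [hcons, List.cons_append, pvSym]
            rw [if_neg (by omega), if_neg (by omega)]
            ring
        · -- queue exhausted: restart it with this person
          have hnil : q.drop head' = [] := List.drop_eq_nil_of_le (by omega)
          have hDeq : q.drop head = D := by rw [hD, hnil, List.append_nil]
          rw [hstep0, if_neg hlen]
          rw [ih [i] 0 0 res (i + 1)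
            (by simp)
            (by intro e he; simp at he; omega)
            hrest_ge hrest_pw (fun _ => Or.inl rfl)]
          rw [if_pos rfl]
          simp only [List.drop_zero, List.singleton_append]
          split
          · -- side = 0
            rw [hDeq, pvSym_dropP_prefix dist D (i :: pvPs rest) (pvTs rest) (by
              intro f hf t ht
              have h1 := hDlt f hf
              have h2 := hTge t (List.mem_of_mem_head? ht)
              omega)]
          · -- side ≠ 0
            rw [hDeq, pvSym_dropT_prefix dist D (i :: pvPs rest) (pvTs rest) (by
              intro f hf z hz
              have h1 := hDlt f hf
              have h2 : i = z := by simpa using hz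
              omega)]
      · -- v = 1: a tagger arrives
        have hps : pvPs ((i, (1:Int)) :: rest) = pvPs rest := by
          simp [pvPs, List.filterMap_cons]
        have hts : pvTs ((i, (1:Int)) :: rest) = i :: pvTs rest := by
          simp [pvTs, List.filterMap_cons]
        rw [hps, hts]
        by_cases hlen : head' < q.length
        · have hcons : q.drop head' = q[head'] :: q.drop (head' + 1) := List.drop_eq_getElem_cons hlen
          have hlive : ¬ q[head'] < i - dist := ha4 hlen
          have hfb : q[head'] < b := hW' _ (by rw [hcons]; exact List.mem_cons_self)
          have hdist1 : 1 ≤ dist := by omega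
          have hne : q.drop head ≠ [] := by
            intro hc
            rw [hD, hcons] at hc
            simp at hc
            omega
          rcases hside hne with h0 | h1
          · -- side = 0 ≠ v: match the oldest live waiting person
            subst h0
            rw [hstep0, if_pos hlen, if_pos (by norm_num)]
            rw [ih q (head' + 1) 0 (res + 1) (i + 1)
              (by omega)
              (by
                intro e he
                have : e ∈ q.drop head' := by
                  rw [hcons]
                  exact List.mem_cons_of_mem _ he
                exact lt_of_lt_of_le (hW' e this) (by omega))
              hrest_ge hrest_pw (fun _ => Or.inl rfl)]
            rw [if_pos rfl, if_pos rfl]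
            have hgoal : q.drop head ++ pvPs rest = D ++ (q.drop head' ++ pvPs rest) := by
              rw [hD, List.append_assoc]
            rw [hgoal, pvSym_dropP_prefix dist D _ _ (by
              intro f hf z hz
              have h1 := hDlt f hf
              have h2 : i = z := by simpa using hz
              omega)]
            rw [hcons, List.cons_append, pvSym]
            rw [if_neg (by omega), if_neg (by omega)]
            ring
          · -- side = 1 = v: same kind, append
            subst h1
            rw [hstep0, if_pos hlen, if_neg (by simp)]
            rw [ih (q ++ [i]) head' 1 res (i + 1)
              (by rw [List.length_append]; omega)
              (by
                intro e he
                rw [List.drop_append_of_le_length (by omega)] at he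
                rcases List.mem_append.mp he with h | h
                · exact lt_of_lt_of_le (hW' e h) (by omega)
                · simp at h; omega)
              hrest_ge hrest_pw (fun _ => Or.inr rfl)]
            rw [if_neg (by norm_num), if_neg (by norm_num)]
            rw [List.drop_append_of_le_length (by omega)]
            have hgoal : q.drop head ++ (i :: pvTs rest) = D ++ ((q.drop head' ++ [i]) ++ pvTs rest) := by
              rw [hD, List.append_assoc, List.append_assoc, List.singleton_append]
            rw [hgoal, pvSym_dropT_prefix dist D _ _ (by
              intro f hf z hz
              have h1 := hDlt f hf
              have h2 := hPge z (List.mem_of_mem_head? hz)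
              omega)]
        · -- queue exhausted: restart it with this tagger
          have hnil : q.drop head' = [] := List.drop_eq_nil_of_le (by omega)
          have hDeq : q.drop head = D := by rw [hD, hnil, List.append_nil]
          rw [hstep0, if_neg hlen]
          rw [ih [i] 0 1 res (i + 1)
            (by simp)
            (by intro e he; simp at he; omega)
            hrest_ge hrest_pw (fun _ => Or.inr rfl)]
          rw [if_neg (by norm_num)]
          simp only [List.drop_zero, List.singleton_append]
          split
          · -- side = 0
            rw [hDeq, pvSym_dropP_prefix dist D (pvPs rest) (i :: pvTs rest) (by
              intro f hf t ht
              have h1 := hDlt f hf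
              have h2 : i = t := by simpa using ht
              omega)]
          · -- side ≠ 0
            rw [hDeq, pvSym_dropT_prefix dist D (pvPs rest) (i :: pvTs rest) (by
              intro f hf z hz
              have h1 := hDlt f hf
              have h2 := hPge z (List.mem_of_mem_head? hz)
              omega)]

-- B equals the symmetric matcher on the index lists
theorem pvAlt_eq_sym (team : List Int) (dist : Int) :
    catchMaximumAmountofPeople_alt team dist = pvSym dist (pvPeople team) (pvTaggers team) := by
  unfold catchMaximumAmountofPeople_alt
  rw [pvRunB dist (PySem.List.enumerate team 0) [] 0 (-1) 0 0
    (by simp) (by simp)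
    (by
      intro iv hiv
      rw [PySem.List.mem_enumerate_iff] at hiv
      rcases hiv with ⟨k, hk, rfl⟩
      simp)
    (by
      rw [List.pairwise_map]
      exact PySem.List.pairwise_lt_enumerate team 0)
    (by simp)]
  norm_num [pvPeople, pvTaggers]

-- the tagger-driven merge equals the symmetric matcher: per tagger, the advance loop is a
-- sequence of pvSym person-discards, then either a match or a tagger-discard
theorem pvMergeFold (team : List Int) (dist : Int) (ts : List Int) :
    ∀ (p : Nat) (res : Int), p ≤ (pvPeople team).length →
    ((ts.foldl (fun (st : Nat × Int) t =>
        let p' := pvAdvance (pvPeople team) (t - dist) st.1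
        if h : p' < (pvPeople team).length then
          if (pvPeople team)[p'] ≤ t + dist then (p' + 1, st.2 + 1) else (p', st.2)
        else (p', st.2)) (p, res)).2) = res + pvSym dist ((pvPeople team).drop p) ts := by
  induction ts with
  | nil => intro p res _; simp [pvSym_nil_right]
  | cons t ts' ih =>
    intro p res hp
    obtain ⟨a1, a2, _, a4⟩ := pvAdvance_spec (pvPeople team) (t - dist) p hp
    obtain ⟨D, hD, hDlt⟩ := pvDrop_split (pvPeople team) (t - dist) p hp
    set ps := pvPeople team with hps
    set p' := pvAdvance ps (t - dist) p with hp'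
    simp only [List.foldl_cons]
    have hdropD : pvSym dist (ps.drop p) (t :: ts') = pvSym dist (ps.drop p') (t :: ts') := by
      rw [hD]
      exact pvSym_dropP_prefix dist D _ _ (by
        intro f hf z hz
        have h2 : t = z := by simpa using hz
        have := hDlt f hf
        omega)
    by_cases hlen : p' < ps.length
    · have hcons : ps.drop p' = ps[p'] :: ps.drop (p' + 1) := List.drop_eq_getElem_cons hlen
      have hge : ¬ ps[p'] < t - dist := a4 hlen
      by_cases hcatch : ps[p'] ≤ t + dist
      · simp only [← hp', dif_pos hlen, if_pos hcatch]
        rw [ih (p' + 1) (res + 1) (by omega), hdropD, hcons, pvSym]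
        rw [if_neg (by omega), if_neg (by omega)]
        ring
      · simp only [← hp', dif_pos hlen, if_neg hcatch]
        rw [ih p' res (by omega), hdropD, hcons, pvSym]
        rw [if_neg (by omega), if_pos (by omega)]
    · have hnil : ps.drop p' = [] := List.drop_eq_nil_of_le (by omega)
      simp only [← hp', dif_neg hlen]
      rw [ih p' res (by omega), hdropD, hnil, pvSym_nil_left, pvSym_nil_left]

theorem pvMerge_eq_sym (team : List Int) (dist : Int) :
    pvMergeRun team dist = pvSym dist (pvPeople team) (pvTaggers team) := by
  unfold pvMergeRun
  rw [pvMergeFold team dist (pvTaggers team) 0 0 (by omega)]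
  simp

-- ===== VERDICT (by name: the statement is the Claim_ definition above) =====
theorem catchMaximumAmountofPeople_spec : Claim_equal_catchMaximumAmountofPeople := by
  intro team dist _
  unfold Spec_catchMaximumAmountofPeople
  rw [pvA_eq_merge, pvMerge_eq_sym, pvAlt_eq_sym]
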